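-- pv_equiv track=rewrite | github.com/jramaswami/Binary_Search_Python | remove_smallest_peaks_in_order.py | solve
-- ===== SOURCE A (Python) =====
-- import heapq
--
-- def solve(nums):
--     # Use a heap to keep track of the smallest peaks.
--     peaks = []
--
--     # Use pointers to keep track next and previous elements as elements
--     # are removed from the list.
--     next_idx = [0 for _ in nums]
--     prev_idx = [0 for _ in nums]
--     p, n = -1, 1
--     for i, _ in enumerate(nums):
--         prev_idx[i], next_idx[i] = p, n
--         p += 1
--         n += 1
--
--     def get_next_i(i):
--         """Return next index or len(nums) if there isn't a next element."""
--         if i < 0: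
--             return -1
--         if i >= len(nums):
--             return len(nums)
--         return next_idx[i]
--
--     def get_prev_i(i):
--         """Return previous index or -1 if there isn't a previous element."""
--         if i < 0:
--             return -1
--         if i >= len(nums):
--             return len(nums)
--         return prev_idx[i]
--
--     def remove_element(i):
--         """Remove element by manipulating next and previous pointers."""
--         prev_i = get_prev_i(i)
--         next_i = get_next_i(i)
--
--         # My next should point to my previous
--         if next_i < len(nums):
--             prev_idx[next_i] = prev_i
--         # My prev shluld point to my next
--         if prev_i >= 0:
--             next_idx[prev_i] = next_i
--
--     def is_peak(i):
--         """Return True if element is currently a peak."""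
--         if i < 0 or i >= len(nums):
--             return False
--
--         prev_i = get_prev_i(i)
--         next_i = get_next_i(i)
--         # If a list has one element, then that element is considered to be
--         # a peak.
--         if prev_i < 0 and next_i >= len(nums):
--             return True
--         elif prev_i < 0:
--             return nums[i] > nums[next_i]
--         elif next_i >= len(nums):
--             return nums[prev_i] < nums[i]
--         return nums[prev_i] < nums[i] and nums[i] > nums[next_i]
--
--     # Find current peaks and add them to the heap
--     for i, n in enumerate(nums):
--         if is_peak(i):
--             heapq.heappush(peaks, (n, i))
--
--     soln = []
--     while peaks:
--         n, i = heapq.heappop(peaks)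
--         soln.append(n)
--         prev_i = get_prev_i(i)
--         next_i = get_next_i(i)
--         # Remove the item from the list.
--         remove_element(i)
--         # Check if the previous or next elements have become peaks.  If
--         # so, add them to the list.
--         if is_peak(prev_i):
--             heapq.heappush(peaks, (nums[prev_i], prev_i))
--         if is_peak(next_i):
--             heapq.heappush(peaks, (nums[next_i], next_i))
--
--     return soln
-- ===== SOURCE B (Python) =====
-- def _is_peak_at(live, j):
--     """True iff live[j] is strictly above each of its existing neighbours."""
--     v = live[j][1]
--     left_ok = (j == 0) or (live[j - 1][1] < v)
--     right_ok = (j == len(live) - 1) or (live[j + 1][1] < v)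
--     return left_ok and right_ok
--
--
-- def solve(nums):
--     # Simpler alternative: keep the live elements as a plain list of
--     # (original index, value) pairs; each round rescan it for the minimum
--     # (value, index) peak, record its value and delete the pair.
--     live = list(enumerate(nums))
--     out = []
--     while True:
--         best = None
--         best_j = -1
--         for j in range(len(live)):
--             if _is_peak_at(live, j):
--                 cand = (live[j][1], live[j][0])
--                 if best is None or cand < best:
--                     best, best_j = cand, j
--         if best is None:
--             return out
--         out.append(best[0])
--         live.pop(best_j)
-- ===== Notes on version B (the rewrite author's own statement) =====
-- stated objective: simpler
-- what changed: B drops A's heap and prev/next pointer arrays entirely: it keeps the live elements as a plain list of (index, value) pairs and, each round, rescans that list for the minimum (value, index) peak, records its value and deletes the pair; this coincides with A because A's heap always pops the current global-minimum peak.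
import Mathlib
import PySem

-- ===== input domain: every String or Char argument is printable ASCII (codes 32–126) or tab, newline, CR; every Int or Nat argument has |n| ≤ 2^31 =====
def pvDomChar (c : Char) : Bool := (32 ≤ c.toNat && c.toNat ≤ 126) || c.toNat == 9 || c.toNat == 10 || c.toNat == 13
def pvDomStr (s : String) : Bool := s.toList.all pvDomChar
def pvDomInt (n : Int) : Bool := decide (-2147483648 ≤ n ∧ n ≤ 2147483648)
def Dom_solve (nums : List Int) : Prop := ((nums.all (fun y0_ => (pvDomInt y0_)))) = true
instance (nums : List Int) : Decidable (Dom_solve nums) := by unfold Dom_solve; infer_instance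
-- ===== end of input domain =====

-- B replaces A's heap + prev/next pointer arrays by a plain list of live (index, value)
-- pairs rescanned for the minimum (value, index) peak each round: simpler, no heap.

-- ===== PORT A =====

-- Python tuple comparison (v, i) < / <= on int pairs, as used by heapq.
def lexLe (a b : Int × Int) : Bool := decide (a.1 < b.1) || (decide (a.1 = b.1) && decide (a.2 ≤ b.2))

-- heapq.heappush: the heap is kept as a lexLe-sorted list (heapq's observable contract:
-- heappop always returns the current minimum; all pairs are distinct).
def hpush (x : Int × Int) : List (Int × Int) → List (Int × Int)
  | [] => [x]
  | y :: ys => if lexLe x y then x :: y :: ys else y :: hpush x ys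

-- the first loop of A: prev_idx[i], next_idx[i] = p, n; p += 1; n += 1
def initPrevNext (n : Nat) : List Int × List Int :=
  let st := (List.range n).foldl
    (fun (st : List Int × List Int × Int × Int) i =>
      (st.1.set i st.2.2.1, st.2.1.set i st.2.2.2, st.2.2.1 + 1, st.2.2.2 + 1))
    (List.replicate n 0, List.replicate n 0, -1, 1)
  (st.1, st.2.1)

def getPrevI (n : Nat) (prev : List Int) (i : Int) : Int :=
  if i < 0 then -1 else if (n : Int) ≤ i then (n : Int) else prev.getD i.toNat 0

def getNextI (n : Nat) (next : List Int) (i : Int) : Int :=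
  if i < 0 then -1 else if (n : Int) ≤ i then (n : Int) else next.getD i.toNat 0

def removeElement (n : Nat) (prev next : List Int) (i : Int) : List Int × List Int :=
  let pi := getPrevI n prev i
  let ni := getNextI n next i
  (if ni < (n : Int) then prev.set ni.toNat pi else prev,
   if 0 ≤ pi then next.set pi.toNat ni else next)

def isPeakA (nums prev next : List Int) (i : Int) : Bool :=
  let n := nums.length
  if i < 0 || (n : Int) ≤ i then false
  else
    let pi := getPrevI n prev i
    let ni := getNextI n next i
    if pi < 0 && (n : Int) ≤ ni then true
    else if pi < 0 then decide (nums.getD ni.toNat 0 < nums.getD i.toNat 0)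
    else if (n : Int) ≤ ni then decide (nums.getD pi.toNat 0 < nums.getD i.toNat 0)
    else decide (nums.getD pi.toNat 0 < nums.getD i.toNat 0) &&
         decide (nums.getD ni.toNat 0 < nums.getD i.toNat 0)

def buildHeap (nums prev next : List Int) : List (Int × Int) :=
  (List.range nums.length).foldl
    (fun h (i : Nat) => if isPeakA nums prev next (i : Int) then hpush (nums.getD i 0, (i : Int)) h else h)
    []

def loopA (nums : List Int) : Nat → List Int → List Int → List (Int × Int) → List Int → List Int
  | _, _, _, [], soln => soln
  | 0, _, _, _ :: _, soln => soln        -- fuel bound, never reached: at most one pop per element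
  | fuel + 1, prev, next, (v, i) :: hs, soln =>
    let n := nums.length
    let pi := getPrevI n prev i
    let ni := getNextI n next i
    let pn := removeElement n prev next i
    let hs1 := if isPeakA nums pn.1 pn.2 pi then hpush (nums.getD pi.toNat 0, pi) hs else hs
    let hs2 := if isPeakA nums pn.1 pn.2 ni then hpush (nums.getD ni.toNat 0, ni) hs1 else hs1
    loopA nums fuel pn.1 pn.2 hs2 (soln ++ [v])

def solve (nums : List Int) : List Int :=
  let pn := initPrevNext nums.length
  loopA nums nums.length pn.1 pn.2 (buildHeap nums pn.1 pn.2) []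

-- ===== PORT B =====

-- Python tuple comparison cand < best
def lexLt (a b : Int × Int) : Bool := decide (a.1 < b.1) || (decide (a.1 = b.1) && decide (a.2 < b.2))

-- 'if best is None or cand < best: best, best_j = cand, j'
def bstep (acc : Option ((Int × Int) × Nat)) (x : (Int × Int) × Nat) : Option ((Int × Int) × Nat) :=
  match acc with
  | none => some x
  | some (b, bj) => if lexLt x.1 b then some x else some (b, bj)

-- the peak test on the live list: strictly above each existing neighbour
def bpeek (live : List (Int × Int)) (j : Nat) : Bool :=
  (j == 0 || decide ((live.getD (j - 1) (0, 0)).2 < (live.getD j (0, 0)).2)) &&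
  (j == live.length - 1 || decide ((live.getD (j + 1) (0, 0)).2 < (live.getD j (0, 0)).2))

-- the candidate (value, index) at position j, with its position
def bcand (live : List (Int × Int)) (j : Nat) : (Int × Int) × Nat :=
  (((live.getD j (0, 0)).2, (live.getD j (0, 0)).1), j)

-- the scan 'for j in range(len(live))' collecting the minimum (value, index) peak
def bestScan (live : List (Int × Int)) : Option ((Int × Int) × Nat) :=
  (List.range live.length).foldl
    (fun acc j => if bpeek live j then bstep acc (bcand live j) else acc) none

-- list(enumerate(nums))
def enumPairs (nums : List Int) : List (Int × Int) :=
  (List.range nums.length).map (fun (i : Nat) => ((i : Int), nums.getD i 0))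

def loopB : Nat → List (Int × Int) → List Int → List Int
  | 0, _, out => out                     -- fuel bound, never reached: at most one pop per element
  | fuel + 1, live, out =>
    match bestScan live with
    | none => out
    | some (best, j) => loopB fuel (live.eraseIdx j) (out ++ [best.1])

def solve_alt (nums : List Int) : List Int :=
  loopB (nums.length + 1) (enumPairs nums) []

-- ===== PRECONDITION & SPEC =====
def Spec_solve (nums : List Int) (out : List Int) : Prop := out = solve_alt nums
instance (nums : List Int) (out : List Int) : Decidable (Spec_solve nums out) := by unfold Spec_solve; infer_instance

-- ===== CLAIM (what is proved, stated in full; the proofs are below) =====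
def Claim_equal_solve : Prop := ∀ (nums : List Int), Dom_solve nums → Spec_solve nums (solve nums)

-- ===== LEMMAS AND PROOFS =====

-- abstract view: I is the list of still-alive indices, in increasing order
def idxAt (I : List Nat) (k : Nat) : Nat := I.getD k 0
def valN (nums : List Int) (I : List Nat) (k : Nat) : Int := nums.getD (idxAt I k) 0
def pairAt (nums : List Int) (I : List Nat) (k : Nat) : Int × Int :=
  (valN nums I k, (idxAt I k : Int))
def peakB (nums : List Int) (I : List Nat) (k : Nat) : Bool :=
  (k == 0 || decide (valN nums I (k - 1) < valN nums I k)) &&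
  (k == I.length - 1 || decide (valN nums I (k + 1) < valN nums I k))
def pp (nums : List Int) (I : List Nat) : List (Int × Int) :=
  ((List.range I.length).filter (peakB nums I)).map (pairAt nums I)
def cands (nums : List Int) (I : List Nat) : List ((Int × Int) × Nat) :=
  ((List.range I.length).filter (peakB nums I)).map (fun k => (pairAt nums I k, k))
def liveOf (nums : List Int) (I : List Nat) : List (Int × Int) :=
  I.map (fun (i : Nat) => ((i : Int), nums.getD i 0))
def pval (I : List Nat) (k : Nat) : Int := if k = 0 then -1 else (idxAt I (k - 1) : Int)
def nval (nums : List Int) (I : List Nat) (k : Nat) : Int :=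
  if k + 1 = I.length then (nums.length : Int) else (idxAt I (k + 1) : Int)

def En (nums : List Int) (I : List Nat) (prev next : List Int) : Prop :=
  I.Pairwise (· < ·) ∧ (∀ i ∈ I, i < nums.length) ∧
  prev.length = nums.length ∧ next.length = nums.length ∧
  (∀ k, k < I.length →
    prev.getD (idxAt I k) 0 = pval I k ∧ next.getD (idxAt I k) 0 = nval nums I k)

def InvAB (nums : List Int) (I : List Nat) (prev next : List Int) (heap : List (Int × Int)) : Prop :=
  En nums I prev next ∧ heap.Pairwise (fun a b => lexLe a b = true) ∧ heap.Perm (pp nums I)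


-- ---------- lexicographic facts ----------
theorem lexLt_irrefl (a : Int × Int) : lexLt a a = false := by simp [lexLt]

theorem lexLt_asymm {a b : Int × Int} (h : lexLt a b = true) : lexLt b a = false := by
  rcases a with ⟨a1, a2⟩; rcases b with ⟨b1, b2⟩
  simp only [lexLt, Bool.or_eq_true, Bool.and_eq_true, decide_eq_true_eq] at h
  simp only [lexLt, Bool.or_eq_false_iff, Bool.and_eq_false_iff, decide_eq_false_iff_not]
  omega

theorem lexLt_of_lexLe_ne {a b : Int × Int} (h : lexLe a b = true) (hne : a ≠ b) :
    lexLt a b = true := by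
  rcases a with ⟨a1, a2⟩; rcases b with ⟨b1, b2⟩
  simp only [lexLe, Bool.or_eq_true, Bool.and_eq_true, decide_eq_true_eq] at h
  simp only [Ne, Prod.mk.injEq, not_and] at hne
  simp only [lexLt, Bool.or_eq_true, Bool.and_eq_true, decide_eq_true_eq]
  by_cases h1 : a1 = b1
  · subst h1; right; exact ⟨rfl, lt_of_le_of_ne (by omega) (hne rfl)⟩
  · omega

theorem lexLe_total (a b : Int × Int) : lexLe a b = true ∨ lexLe b a = true := by
  rcases a with ⟨a1, a2⟩; rcases b with ⟨b1, b2⟩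
  simp only [lexLe, Bool.or_eq_true, Bool.and_eq_true, decide_eq_true_eq]
  omega

theorem lexLe_trans {a b c : Int × Int} (h1 : lexLe a b = true) (h2 : lexLe b c = true) :
    lexLe a c = true := by
  rcases a with ⟨a1, a2⟩; rcases b with ⟨b1, b2⟩; rcases c with ⟨c1, c2⟩
  simp only [lexLe, Bool.or_eq_true, Bool.and_eq_true, decide_eq_true_eq] at h1 h2 ⊢
  omega

-- ---------- hpush facts ----------
theorem hpush_perm (x : Int × Int) (l : List (Int × Int)) : (hpush x l).Perm (x :: l) := by
  induction l with
  | nil => simp [hpush]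
  | cons y ys ih =>
    by_cases h : lexLe x y = true
    · simp [hpush, h]
    · have hstep : hpush x (y :: ys) = y :: hpush x ys := by simp [hpush, h]
      rw [hstep]
      exact (ih.cons y).trans (List.Perm.swap x y ys)

theorem hpush_pairwise {l : List (Int × Int)}
    (hl : l.Pairwise (fun a b => lexLe a b = true)) (x : Int × Int) :
    (hpush x l).Pairwise (fun a b => lexLe a b = true) := by
  induction l with
  | nil => simp [hpush]
  | cons y ys ih =>
    rw [List.pairwise_cons] at hl
    obtain ⟨hy, hys⟩ := hl
    by_cases h : lexLe x y = true
    · rw [hpush, if_pos h, List.pairwise_cons]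
      refine ⟨?_, List.pairwise_cons.mpr ⟨hy, hys⟩⟩
      intro z hz
      rcases List.mem_cons.mp hz with rfl | hz
      · exact h
      · exact lexLe_trans h (hy z hz)
    · rw [hpush, if_neg h, List.pairwise_cons]
      refine ⟨?_, ih hys⟩
      intro z hz
      have hz' := (hpush_perm x ys).mem_iff.mp hz
      rcases List.mem_cons.mp hz' with rfl | hz'
      · rcases lexLe_total z y with h' | h'
        · exact absurd h' h
        · exact h'
      · exact hy z hz'

theorem hfold_perm (l : List (Int × Int)) :
    ∀ acc, (l.foldl (fun h x => hpush x h) acc).Perm (l ++ acc) := by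
  induction l with
  | nil => intro acc; simp
  | cons x xs ih =>
    intro acc
    simp only [List.foldl_cons, List.cons_append]
    exact (ih (hpush x acc)).trans
      (((hpush_perm x acc).append_left xs).trans List.perm_middle)

theorem hfold_pairwise (l : List (Int × Int)) :
    ∀ acc, acc.Pairwise (fun a b => lexLe a b = true) →
      (l.foldl (fun h x => hpush x h) acc).Pairwise (fun a b => lexLe a b = true) := by
  induction l with
  | nil => intro acc h; simpa using h
  | cons x xs ih => intro acc h; exact ih (hpush x acc) (hpush_pairwise h x)

-- ---------- generic guarded fold ----------
theorem foldl_guard {α β γ : Type} (p : α → Bool) (g : α → β) (f : γ → β → γ) :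
    ∀ (l : List α) (a0 : γ),
      l.foldl (fun a x => if p x then f a (g x) else a) a0 = ((l.filter p).map g).foldl f a0 := by
  intro l
  induction l with
  | nil => intro a0; rfl
  | cons x xs ih =>
    intro a0
    by_cases h : p x = true
    · simp [h, ih]
    · simp [h, ih]

-- ---------- getD/set helpers ----------
theorem getD_set_eq {l : List Int} {a : Nat} (h : a < l.length) (x : Int) :
    (l.set a x).getD a 0 = x := by
  rw [List.getD_eq_getElem _ _ (by simpa using h), List.getElem_set, if_pos rfl]

theorem getD_set_ne {l : List Int} {a b : Nat} (h : a ≠ b) (x : Int) :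
    (l.set a x).getD b 0 = l.getD b 0 := by
  by_cases hb : b < l.length
  · rw [List.getD_eq_getElem _ _ (by simpa using hb), List.getD_eq_getElem _ _ hb,
      List.getElem_set, if_neg h]
  · rw [List.getD_eq_default _ _ (by simpa using Nat.le_of_not_lt hb),
      List.getD_eq_default _ _ (Nat.le_of_not_lt hb)]

-- ---------- idxAt facts ----------
theorem idxAt_mem {I : List Nat} {k : Nat} (h : k < I.length) : idxAt I k ∈ I := by
  rw [idxAt, List.getD_eq_getElem _ _ h]
  exact List.getElem_mem h

theorem idxAt_lt {I : List Nat} (hI : I.Pairwise (· < ·)) {a b : Nat}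
    (hab : a < b) (hb : b < I.length) : idxAt I a < idxAt I b := by
  rw [idxAt, idxAt, List.getD_eq_getElem _ _ (lt_trans hab hb), List.getD_eq_getElem _ _ hb]
  exact List.pairwise_iff_getElem.mp hI a b (lt_trans hab hb) hb hab

theorem idxAt_inj {I : List Nat} (hI : I.Pairwise (· < ·)) {a b : Nat}
    (ha : a < I.length) (hb : b < I.length) (h : idxAt I a = idxAt I b) : a = b := by
  rcases lt_trichotomy a b with hab | hab | hab
  · have := idxAt_lt hI hab hb; omega
  · exact hab
  · have := idxAt_lt hI hab ha; omega

theorem length_eraseIdx' {I : List Nat} {k : Nat} (hk : k < I.length) :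
    (I.eraseIdx k).length = I.length - 1 := by
  rw [List.length_eraseIdx]; simp [hk]

theorem idxAt_erase_lt {I : List Nat} {k m : Nat} (hk : k < I.length) (hm : m < k) :
    idxAt (I.eraseIdx k) m = idxAt I m := by
  have h1 : m < (I.eraseIdx k).length := by rw [length_eraseIdx' hk]; omega
  rw [idxAt, idxAt, List.getD_eq_getElem _ _ h1, List.getD_eq_getElem _ _ (by omega),
    List.getElem_eraseIdx, dif_pos hm]

theorem idxAt_erase_ge {I : List Nat} {k m : Nat} (hk : k < I.length) (hm : k ≤ m) :
    idxAt (I.eraseIdx k) m = idxAt I (m + 1) := by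
  by_cases h1 : m < (I.eraseIdx k).length
  · rw [idxAt, idxAt, List.getD_eq_getElem _ _ h1, List.getD_eq_getElem _ _
      (by rw [length_eraseIdx' hk] at h1; omega), List.getElem_eraseIdx, dif_neg (by omega)]
  · rw [length_eraseIdx' hk] at h1
    rw [idxAt, idxAt, List.getD_eq_default _ _ (by rw [length_eraseIdx' hk]; omega),
      List.getD_eq_default _ _ (by omega)]

theorem valN_erase_lt {nums : List Int} {I : List Nat} {k m : Nat}
    (hk : k < I.length) (hm : m < k) :
    valN nums (I.eraseIdx k) m = valN nums I m := by
  rw [valN, valN, idxAt_erase_lt hk hm]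

theorem valN_erase_ge {nums : List Int} {I : List Nat} {k m : Nat}
    (hk : k < I.length) (hm : k ≤ m) :
    valN nums (I.eraseIdx k) m = valN nums I (m + 1) := by
  rw [valN, valN, idxAt_erase_ge hk hm]

theorem pairAt_erase_lt {nums : List Int} {I : List Nat} {k m : Nat}
    (hk : k < I.length) (hm : m < k) :
    pairAt nums (I.eraseIdx k) m = pairAt nums I m := by
  rw [pairAt, pairAt, idxAt_erase_lt hk hm, valN_erase_lt hk hm]

theorem pairAt_erase_ge {nums : List Int} {I : List Nat} {k m : Nat}
    (hk : k < I.length) (hm : k ≤ m) :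
    pairAt nums (I.eraseIdx k) m = pairAt nums I (m + 1) := by
  rw [pairAt, pairAt, idxAt_erase_ge hk hm, valN_erase_ge hk hm]

-- ---------- peak facts ----------
theorem peak_adj_lt {nums : List Int} {I : List Nat} {k : Nat} (hk : k < I.length)
    (h1 : 1 ≤ k) (hpk : peakB nums I k = true) : peakB nums I (k - 1) = false := by
  have hs : k - 1 + 1 = k := by omega
  simp only [peakB, Bool.and_eq_true, Bool.or_eq_true, beq_iff_eq, decide_eq_true_eq] at hpk
  simp only [peakB, Bool.and_eq_false_iff, Bool.or_eq_false_iff, beq_eq_false_iff_ne, Ne,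
    decide_eq_false_iff_not, hs]
  omega

theorem peak_adj_gt {nums : List Int} {I : List Nat} {k : Nat} (hk2 : k + 1 < I.length)
    (hpk : peakB nums I k = true) : peakB nums I (k + 1) = false := by
  simp only [peakB, Bool.and_eq_true, Bool.or_eq_true, beq_iff_eq, decide_eq_true_eq] at hpk
  simp only [peakB, Bool.and_eq_false_iff, Bool.or_eq_false_iff, beq_eq_false_iff_ne, Ne,
    decide_eq_false_iff_not, Nat.add_sub_cancel]
  omega

theorem peakB_erase_lo {nums : List Int} {I : List Nat} {k m : Nat}
    (hk : k < I.length) (hm : m + 1 < k) :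
    peakB nums (I.eraseIdx k) m = peakB nums I m := by
  have hl : (I.eraseIdx k).length = I.length - 1 := length_eraseIdx' hk
  have h1 : valN nums (I.eraseIdx k) (m - 1) = valN nums I (m - 1) :=
    valN_erase_lt hk (by omega)
  have h2 : valN nums (I.eraseIdx k) m = valN nums I m := valN_erase_lt hk (by omega)
  have h3 : valN nums (I.eraseIdx k) (m + 1) = valN nums I (m + 1) :=
    valN_erase_lt hk (by omega)
  have h4 : (m == (I.eraseIdx k).length - 1) = false := by
    rw [beq_eq_false_iff_ne]; rw [hl]; omega
  have h5 : (m == I.length - 1) = false := by rw [beq_eq_false_iff_ne]; omega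
  rw [peakB, peakB, h1, h2, h3, h4, h5]

theorem peakB_erase_hi {nums : List Int} {I : List Nat} {k m : Nat}
    (hk : k < I.length) (hm : k + 1 ≤ m) :
    peakB nums (I.eraseIdx k) m = peakB nums I (m + 1) := by
  have hl : (I.eraseIdx k).length = I.length - 1 := length_eraseIdx' hk
  have h1 : valN nums (I.eraseIdx k) (m - 1) = valN nums I m := by
    rw [valN_erase_ge hk (by omega)]; congr 1; omega
  have h2 : valN nums (I.eraseIdx k) m = valN nums I (m + 1) := valN_erase_ge hk (by omega)
  have h3 : valN nums (I.eraseIdx k) (m + 1) = valN nums I (m + 2) :=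
    valN_erase_ge hk (by omega)
  have h4 : (m == (I.eraseIdx k).length - 1) = ((m + 1) == I.length - 1) := by
    rw [hl]
    rcases eq_or_ne (m + 1) (I.length - 1) with he | he
    · rw [beq_iff_eq.mpr (by omega : m = I.length - 1 - 1), beq_iff_eq.mpr he]
    · rw [beq_eq_false_iff_ne.mpr (by omega : m ≠ I.length - 1 - 1),
        beq_eq_false_iff_ne.mpr he]
  have h5 : ((m + 1 : Nat) == (0 : Nat)) = false := by rw [beq_eq_false_iff_ne]; omega
  have h6 : ((m : Nat) == (0 : Nat)) = false := by rw [beq_eq_false_iff_ne]; omega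
  have h7 : valN nums I (m + 1 - 1) = valN nums I m := by congr 1
  rw [peakB, peakB, h1, h2, h3, h4, h5, h6, h7]

-- ---------- range/filter decompositions ----------
theorem filter_range_split (p : Nat → Bool) (a L : Nat) (ha : a ≤ L) :
    (List.range L).filter p =
      (List.range a).filter p ++
      ((if a < L then (if p a then [a] else []) else []) ++
       ((List.range (L - a - 1)).map (fun t => a + 1 + t)).filter p) := by
  rcases Nat.eq_or_lt_of_le ha with rfl | h
  · simp
  · conv_lhs => rw [show L = a + 1 + (L - a - 1) by omega]
    rw [List.range_add, List.filter_append, List.range_succ, List.filter_append]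
    simp only [if_pos h, List.append_assoc]
    congr 1
    rw [List.filter_singleton]
    rcases Bool.eq_false_or_eq_true (p a) with hp | hp <;> simp [hp]

theorem head_chunk_eq {nums : List Int} {I : List Nat} {k : Nat}
    (hk : k < I.length) (hpk : peakB nums I k = true) :
    (List.range k).filter (peakB nums I) = (List.range (k - 1)).filter (peakB nums I) := by
  rcases Nat.eq_zero_or_pos k with rfl | h
  · rfl
  · conv_lhs => rw [show k = (k - 1) + 1 by omega]
    rw [List.range_succ, List.filter_append, List.filter_singleton]
    rw [peak_adj_lt hk h hpk]
    simp

theorem tail_chunk_eq {nums : List Int} {I : List Nat} {k : Nat}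
    (hk : k < I.length) (hpk : peakB nums I k = true) :
    ((List.range (I.length - k - 1)).map (fun t => k + 1 + t)).filter (peakB nums I) =
      ((List.range (I.length - k - 2)).map (fun t => k + 2 + t)).filter (peakB nums I) := by
  by_cases hc : k + 1 < I.length
  · have h1 : I.length - k - 1 = (I.length - k - 2) + 1 := by omega
    rw [h1, List.range_succ_eq_map, List.map_cons, List.filter_cons, List.map_map]
    have hp : peakB nums I (k + 1 + 0) = false := by
      simpa using peak_adj_gt hc hpk
    rw [hp]
    have hf : ((fun t => k + 1 + t) ∘ Nat.succ) = (fun t => k + 2 + t) := by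
      funext t; simp [Function.comp]; omega
    rw [hf]
    simp
  · have h1 : I.length - k - 1 = 0 := by omega
    have h2 : I.length - k - 2 = 0 := by omega
    rw [h1, h2]
    simp

theorem pp_split {nums : List Int} {I : List Nat} {k : Nat}
    (hk : k < I.length) (hpk : peakB nums I k = true) :
    pp nums I =
      ((List.range (k - 1)).filter (peakB nums I)).map (pairAt nums I) ++
      ([pairAt nums I k] ++
       ((((List.range (I.length - k - 2)).map (fun t => k + 2 + t)).filter
          (peakB nums I)).map (pairAt nums I))) := by
  rw [pp, filter_range_split (peakB nums I) k I.length (le_of_lt hk), if_pos hk, if_pos hpk,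
    head_chunk_eq hk hpk, tail_chunk_eq hk hpk, List.map_append, List.map_append]
  simp

theorem pp_split_erase {nums : List Int} {I : List Nat} {k : Nat}
    (hk : k < I.length) :
    pp nums (I.eraseIdx k) =
      ((List.range (k - 1)).filter (peakB nums I)).map (pairAt nums I) ++
      ((if k - 1 < k then
          (if peakB nums (I.eraseIdx k) (k - 1) = true
           then [pairAt nums (I.eraseIdx k) (k - 1)] else [])
        else []) ++
       ((if k < (I.eraseIdx k).length then
           (if peakB nums (I.eraseIdx k) k = true
            then [pairAt nums (I.eraseIdx k) k] else [])
         else []) ++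
        ((((List.range (I.length - k - 2)).map (fun t => k + 2 + t)).filter
           (peakB nums I)).map (pairAt nums I)))) := by
  have hl : (I.eraseIdx k).length = I.length - 1 := length_eraseIdx' hk
  have ha : ((List.range (k - 1)).filter (peakB nums (I.eraseIdx k))).map
      (pairAt nums (I.eraseIdx k)) =
      ((List.range (k - 1)).filter (peakB nums I)).map (pairAt nums I) := by
    rw [List.filter_congr (fun m hm => peakB_erase_lo hk
      (by rw [List.mem_range] at hm; omega))]
    exact List.map_inj_left.mpr (fun m hm => by
      rw [List.mem_filter, List.mem_range] at hm
      exact pairAt_erase_lt hk (by omega))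
  have hd : (((List.range ((I.eraseIdx k).length - k - 1)).map
        (fun t => k + 1 + t)).filter (peakB nums (I.eraseIdx k))).map
        (pairAt nums (I.eraseIdx k)) =
      (((List.range (I.length - k - 2)).map (fun t => k + 2 + t)).filter
        (peakB nums I)).map (pairAt nums I) := by
    have hll : (I.eraseIdx k).length - k - 1 = I.length - k - 2 := by omega
    rw [hll, List.filter_map, List.filter_map, List.map_map, List.map_map]
    rw [List.filter_congr (fun t ht => by
      simp only [Function.comp_apply]
      rw [peakB_erase_hi hk (by omega)]
      congr 1
      omega : ∀ t ∈ List.range (I.length - k - 2),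
        (peakB nums (I.eraseIdx k) ∘ (fun t => k + 1 + t)) t =
        (peakB nums I ∘ (fun t => k + 2 + t)) t)]
    exact List.map_inj_left.mpr (fun t ht => by
      simp only [Function.comp_apply]
      rw [pairAt_erase_ge hk (by omega)]
      congr 1
      omega)
  rw [pp, filter_range_split (peakB nums (I.eraseIdx k)) k (I.eraseIdx k).length (by omega),
    filter_range_split (peakB nums (I.eraseIdx k)) (k - 1) k (by omega),
    show k - (k - 1) - 1 = 0 by omega]
  simp only [List.range_zero, List.map_nil, List.filter_nil, List.append_nil,
    List.append_assoc, List.map_append]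
  rw [ha, hd]
  congr 1
  congr 1
  · by_cases hx : k - 1 < k
    · by_cases hy : peakB nums (I.eraseIdx k) (k - 1) = true <;> simp [hx, hy]
    · simp [hx]
  congr 1
  · by_cases hx : k < (I.eraseIdx k).length
    · by_cases hy : peakB nums (I.eraseIdx k) k = true <;> simp [hx, hy]
    · simp [hx]

-- ---------- reading the pointer arrays ----------
theorem en_bounds {nums : List Int} {I : List Nat} {prev next : List Int}
    (hEn : En nums I prev next) {k : Nat} (hk : k < I.length) :
    idxAt I k < nums.length :=
  hEn.2.1 _ (idxAt_mem hk)

theorem getPrevI_at {nums : List Int} {I : List Nat} {prev next : List Int}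
    (hEn : En nums I prev next) {k : Nat} (hk : k < I.length) :
    getPrevI nums.length prev ((idxAt I k : Nat) : Int) = pval I k := by
  have hb := en_bounds hEn hk
  rw [getPrevI, if_neg (by simp), if_neg (by exact_mod_cast Nat.not_le.mpr hb)]
  simp only [Int.toNat_natCast]
  exact (hEn.2.2.2.2 k hk).1

theorem getNextI_at {nums : List Int} {I : List Nat} {prev next : List Int}
    (hEn : En nums I prev next) {k : Nat} (hk : k < I.length) :
    getNextI nums.length next ((idxAt I k : Nat) : Int) = nval nums I k := by
  have hb := en_bounds hEn hk
  rw [getNextI, if_neg (by simp), if_neg (by exact_mod_cast Nat.not_le.mpr hb)]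
  simp only [Int.toNat_natCast]
  exact (hEn.2.2.2.2 k hk).2

-- ---------- isPeakA agrees with the positional peak predicate ----------
theorem isPeakA_out {nums prev next : List Int} {i : Int}
    (h : i < 0 ∨ (nums.length : Int) ≤ i) : isPeakA nums prev next i = false := by
  rw [isPeakA]
  rcases h with h | h <;> simp [h]

theorem isPeakA_eq {nums : List Int} {I : List Nat} {prev next : List Int}
    (hEn : En nums I prev next) {k : Nat} (hk : k < I.length) :
    isPeakA nums prev next ((idxAt I k : Nat) : Int) = peakB nums I k := by
  have hb := en_bounds hEn hk
  have hpv := getPrevI_at hEn hk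
  have hnv := getNextI_at hEn hk
  have hg : (decide (((idxAt I k : Nat) : Int) < 0) ||
      decide ((nums.length : Int) ≤ ((idxAt I k : Nat) : Int))) = false := by
    simp only [Bool.or_eq_false_iff, decide_eq_false_iff_not]
    omega
  rw [Bool.eq_iff_iff]
  simp only [isPeakA, hpv, hnv, hg, Bool.false_eq_true, if_false]
  by_cases h0 : k = 0 <;> by_cases hL : k + 1 = I.length
  · subst h0
    rw [pval, if_pos rfl, nval, if_pos hL]
    have hbeq : ((0 : Nat) == I.length - 1) = true := by rw [beq_iff_eq]; omega
    simp [peakB, hbeq]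
  · subst h0
    rw [pval, if_pos rfl, nval, if_neg hL]
    have hb1 : idxAt I (0 + 1) < nums.length := en_bounds hEn (by omega)
    have hc : ¬ (nums.length : Int) ≤ ((idxAt I (0 + 1) : Nat) : Int) := by
      exact_mod_cast Nat.not_le.mpr hb1
    have hbeq : ((0 : Nat) == I.length - 1) = false := by rw [beq_eq_false_iff_ne]; omega
    simp [peakB, hbeq, hc, valN]
  · rw [pval, if_neg h0, nval, if_pos hL]
    have hc : ¬ ((idxAt I (k - 1) : Nat) : Int) < 0 := by omega
    have hbeq0 : ((k : Nat) == (0 : Nat)) = false := by rw [beq_eq_false_iff_ne]; exact h0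
    have hbeqL : ((k : Nat) == I.length - 1) = true := by rw [beq_iff_eq]; omega
    simp [peakB, hbeq0, hbeqL, hc, valN]
  · rw [pval, if_neg h0, nval, if_neg hL]
    have hb2 : idxAt I (k + 1) < nums.length := en_bounds hEn (by omega)
    have hc1 : ¬ ((idxAt I (k - 1) : Nat) : Int) < 0 := by omega
    have hc2 : ¬ (nums.length : Int) ≤ ((idxAt I (k + 1) : Nat) : Int) := by
      exact_mod_cast Nat.not_le.mpr hb2
    have hbeq0 : ((k : Nat) == (0 : Nat)) = false := by rw [beq_eq_false_iff_ne]; exact h0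
    have hbeqL : ((k : Nat) == I.length - 1) = false := by rw [beq_eq_false_iff_ne]; omega
    simp [peakB, hbeq0, hbeqL, hc1, hc2, valN]

-- ---------- pval/nval after a removal ----------
theorem pval_erase {I : List Nat} {k m : Nat} (hk : k < I.length) :
    pval (I.eraseIdx k) m = if m ≤ k then pval I m else pval I (m + 1) := by
  by_cases hmk : m ≤ k
  · rw [if_pos hmk, pval, pval]
    by_cases h0 : m = 0
    · simp [h0]
    · rw [if_neg h0, if_neg h0]
      by_cases hm1 : m - 1 < k
      · rw [idxAt_erase_lt hk hm1]
      · -- m - 1 = k and m ≤ k is impossible unless m = k, m - 1 < k (k > 0); so m-1 ≥ k → m = k? m ≤ k ∧ m-1 ≥ k → k ≤ m-1 < m ≤ k, contradiction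
        omega
  · rw [if_neg hmk, pval, pval, if_neg (by omega), if_neg (by omega)]
    rw [idxAt_erase_ge hk (by omega), show m - 1 + 1 = m + 1 - 1 by omega]

theorem nval_erase {nums : List Int} {I : List Nat} {k m : Nat}
    (hk : k < I.length) (hm : m < I.length - 1) :
    nval nums (I.eraseIdx k) m =
      if m + 1 < k then nval nums I m
      else if m + 1 = k then nval nums I k
      else nval nums I (m + 1) := by
  have hl : (I.eraseIdx k).length = I.length - 1 := length_eraseIdx' hk
  by_cases h1 : m + 1 < k
  · rw [if_pos h1, nval, nval, hl, if_neg (by omega), if_neg (by omega),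
      idxAt_erase_lt hk (by omega)]
  · by_cases h2 : m + 1 = k
    · rw [if_neg h1, if_pos h2, nval, nval, hl]
      by_cases hL : k + 1 = I.length
      · rw [if_pos (by omega), if_pos hL]
      · rw [if_neg (by omega), if_neg hL, idxAt_erase_ge hk (by omega), h2]
    · rw [if_neg h1, if_neg h2, nval, nval, hl]
      by_cases hL : m + 1 + 1 = I.length
      · rw [if_pos (by omega), if_pos hL]
      · rw [if_neg (by omega), if_neg hL, idxAt_erase_ge hk (by omega)]

-- ---------- the unlinking preserves the encoding ----------
theorem En_remove {nums : List Int} {I : List Nat} {prev next : List Int}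
    (hEn : En nums I prev next) {k : Nat} (hk : k < I.length) :
    En nums (I.eraseIdx k)
      (removeElement nums.length prev next ((idxAt I k : Nat) : Int)).1
      (removeElement nums.length prev next ((idxAt I k : Nat) : Int)).2 := by
  have hpv := getPrevI_at hEn hk
  have hnv := getNextI_at hEn hk
  obtain ⟨hI, hbnd, hpl, hnl, hptr⟩ := hEn
  simp only [removeElement, hpv, hnv]
  refine ⟨List.Pairwise.sublist (List.eraseIdx_sublist I k) hI,
    fun i hi => hbnd i (List.Sublist.mem hi (List.eraseIdx_sublist I k)),
    by split <;> simp [hpl],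
    by split <;> simp [hnl], ?_⟩
  intro m hm
  rw [length_eraseIdx' hk] at hm
  constructor
  · -- prev side
    by_cases hL : k + 1 = I.length
    · have hnvk : nval nums I k = (nums.length : Int) := by rw [nval, if_pos hL]
      rw [hnvk, if_neg (by omega)]
      have hmk : m < k := by omega
      rw [idxAt_erase_lt hk hmk, (hptr m (by omega)).1, pval_erase hk, if_pos (by omega)]
    · have hkl : k + 1 < I.length := by omega
      have hnvk : nval nums I k = ((idxAt I (k + 1) : Nat) : Int) := by rw [nval, if_neg hL]
      have hblt : idxAt I (k + 1) < nums.length := hbnd _ (idxAt_mem hkl)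
      rw [hnvk, if_pos (by exact_mod_cast hblt)]
      simp only [Int.toNat_natCast]
      by_cases hmk : m = k
      · subst hmk
        rw [idxAt_erase_ge hk (le_refl m), getD_set_eq (by rw [hpl]; exact hblt),
          pval_erase hk, if_pos (le_refl m)]
      · have hq : idxAt (I.eraseIdx k) m = idxAt I (if m < k then m else m + 1) := by
          split
          · exact idxAt_erase_lt hk (by omega)
          · exact idxAt_erase_ge hk (by omega)
        have hql : (if m < k then m else m + 1) < I.length := by split <;> omega
        have hqne : (if m < k then m else m + 1) ≠ k + 1 := by split <;> omega
        have hne : idxAt I (k + 1) ≠ idxAt (I.eraseIdx k) m := by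
          rw [hq]
          intro h
          exact hqne ((idxAt_inj hI hkl hql h).symm)
        rw [getD_set_ne hne, hq]
        by_cases hmlt : m < k
        · rw [if_pos hmlt, (hptr m (by omega)).1, pval_erase hk, if_pos (by omega)]
        · rw [if_neg hmlt, (hptr (m + 1) (by omega)).1, pval_erase hk, if_neg (by omega)]
  · -- next side
    by_cases h0 : k = 0
    · have hpvk : pval I k = -1 := by rw [pval, if_pos h0]
      rw [hpvk, if_neg (by norm_num)]
      subst h0
      rw [idxAt_erase_ge hk (Nat.zero_le m), (hptr (m + 1) (by omega)).2,
        nval_erase hk (by omega), if_neg (by omega), if_neg (by omega)]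
    · have hk0 : 0 < k := Nat.pos_of_ne_zero h0
      have hpvk : pval I k = ((idxAt I (k - 1) : Nat) : Int) := by rw [pval, if_neg h0]
      have hblt : idxAt I (k - 1) < nums.length := hbnd _ (idxAt_mem (by omega))
      rw [hpvk, if_pos (Int.natCast_nonneg _)]
      simp only [Int.toNat_natCast]
      by_cases hmk : m = k - 1
      · subst hmk
        rw [idxAt_erase_lt hk (by omega), getD_set_eq (by rw [hnl]; exact hblt),
          nval_erase hk (by omega), if_neg (by omega), if_pos (by omega)]
      · have hq : idxAt (I.eraseIdx k) m = idxAt I (if m < k then m else m + 1) := by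
          split
          · exact idxAt_erase_lt hk (by omega)
          · exact idxAt_erase_ge hk (by omega)
        have hql : (if m < k then m else m + 1) < I.length := by split <;> omega
        have hqne : (if m < k then m else m + 1) ≠ k - 1 := by split <;> omega
        have hne : idxAt I (k - 1) ≠ idxAt (I.eraseIdx k) m := by
          rw [hq]
          intro h
          exact hqne ((idxAt_inj hI (by omega) hql h).symm)
        rw [getD_set_ne hne, hq]
        by_cases hmlt : m < k
        · rw [if_pos hmlt, (hptr m (by omega)).2, nval_erase hk (by omega),
            if_pos (by omega)]
        · rw [if_neg hmlt, (hptr (m + 1) (by omega)).2, nval_erase hk (by omega),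
            if_neg (by omega), if_neg (by omega)]

-- ---------- the initial arrays ----------
theorem set_map_range (f : Nat → Int) {n a : Nat} (x : Int) (_ha : a < n) :
    ((List.range n).map f).set a x =
      (List.range n).map (fun i => if i = a then x else f i) := by
  apply List.ext_getElem
  · simp
  · intro i h1 h2
    simp only [List.getElem_set, List.getElem_map, List.getElem_range]
    by_cases h : a = i
    · subst h; simp
    · rw [if_neg h, if_neg (fun hh => h hh.symm)]

theorem initPrevNext_spec (n : Nat) :
    initPrevNext n = ((List.range n).map (fun (i : Nat) => (i : Int) - 1),
                      (List.range n).map (fun (i : Nat) => (i : Int) + 1)) := by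
  have key : ∀ m, m ≤ n → (List.range m).foldl
      (fun (st : List Int × List Int × Int × Int) i =>
        (st.1.set i st.2.2.1, st.2.1.set i st.2.2.2, st.2.2.1 + 1, st.2.2.2 + 1))
      (List.replicate n 0, List.replicate n 0, -1, 1) =
      ((List.range n).map (fun i => if i < m then (i : Int) - 1 else 0),
       (List.range n).map (fun i => if i < m then (i : Int) + 1 else 0),
       (m : Int) - 1, (m : Int) + 1) := by
    intro m
    induction m with
    | zero =>
      intro _
      simp only [List.range_zero, List.foldl_nil, Nat.not_lt_zero, if_false]
      have h1 : (List.range n).map (fun (_ : Nat) => (0 : Int)) = List.replicate n 0 := by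
        rw [List.map_const', List.length_range]
      rw [h1]
      norm_num
    | succ m ih =>
      intro hm
      rw [List.range_succ, List.foldl_append, ih (by omega), List.foldl_cons, List.foldl_nil]
      simp only [Prod.mk.injEq]
      refine ⟨?_, ?_, by push_cast; ring, by push_cast; ring⟩
      · rw [set_map_range _ _ (by omega)]
        apply List.map_inj_left.mpr
        intro i hi
        by_cases h : i = m
        · subst h; simp
        · by_cases h2 : i < m
          · rw [if_neg h, if_pos h2, if_pos (by omega)]
          · rw [if_neg h, if_neg h2, if_neg (by omega)]
      · rw [set_map_range _ _ (by omega)]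
        apply List.map_inj_left.mpr
        intro i hi
        by_cases h : i = m
        · subst h; simp
        · by_cases h2 : i < m
          · rw [if_neg h, if_pos h2, if_pos (by omega)]
          · rw [if_neg h, if_neg h2, if_neg (by omega)]
  have hfin := key n (le_refl n)
  rw [initPrevNext]
  simp only [hfin]
  refine Prod.ext ?_ ?_
  · apply List.map_inj_left.mpr
    intro i hi
    rw [if_pos (List.mem_range.mp hi)]
  · apply List.map_inj_left.mpr
    intro i hi
    rw [if_pos (List.mem_range.mp hi)]

theorem idxAt_range {n k : Nat} (hk : k < n) : idxAt (List.range n) k = k := by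
  rw [idxAt, List.getD_eq_getElem _ _ (by simpa using hk), List.getElem_range]

theorem En_init (nums : List Int) :
    En nums (List.range nums.length) (initPrevNext nums.length).1
      (initPrevNext nums.length).2 := by
  rw [initPrevNext_spec]
  refine ⟨List.pairwise_lt_range, fun i hi => List.mem_range.mp hi, by simp, by simp, ?_⟩
  intro k hk
  rw [List.length_range] at hk
  have hidx : idxAt (List.range nums.length) k = k := idxAt_range hk
  constructor
  · rw [hidx, List.getD_eq_getElem _ _ (by simpa using hk), List.getElem_map,
      List.getElem_range, pval]
    by_cases h0 : k = 0
    · simp [h0]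
    · rw [if_neg h0, idxAt_range (by omega)]
      push_cast [Nat.cast_sub (by omega : 1 ≤ k)]
      ring
  · rw [hidx, List.getD_eq_getElem _ _ (by simpa using hk), List.getElem_map,
      List.getElem_range, nval, List.length_range]
    by_cases hL : k + 1 = nums.length
    · rw [if_pos hL, ← hL]
      push_cast
      ring
    · rw [if_neg hL, idxAt_range (by omega)]
      push_cast
      ring

theorem heap_init (nums : List Int) :
    (buildHeap nums (initPrevNext nums.length).1 (initPrevNext nums.length).2).Pairwise
      (fun a b => lexLe a b = true) ∧
    (buildHeap nums (initPrevNext nums.length).1 (initPrevNext nums.length).2).Perm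
      (pp nums (List.range nums.length)) := by
  have hEn := En_init nums
  rw [buildHeap, foldl_guard
    (fun (i : Nat) => isPeakA nums (initPrevNext nums.length).1 (initPrevNext nums.length).2
      (i : Int))
    (fun (i : Nat) => (nums.getD i 0, (i : Int))) (fun h x => hpush x h)]
  constructor
  · exact hfold_pairwise _ [] List.Pairwise.nil
  · refine (hfold_perm _ []).trans ?_
    rw [List.append_nil]
    have heq : ((List.range nums.length).filter
        (fun (i : Nat) => isPeakA nums (initPrevNext nums.length).1 (initPrevNext nums.length).2
          (i : Int))).map (fun (i : Nat) => (nums.getD i 0, (i : Int))) =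
        pp nums (List.range nums.length) := by
      rw [pp, List.length_range]
      have hfc : ∀ i ∈ List.range nums.length,
          isPeakA nums (initPrevNext nums.length).1 (initPrevNext nums.length).2 (i : Int) =
            peakB nums (List.range nums.length) i := by
        intro i hi
        have hilt := List.mem_range.mp hi
        have h := isPeakA_eq hEn (k := i) (by simpa using hilt)
        rwa [idxAt_range hilt] at h
      rw [List.filter_congr hfc]
      apply List.map_inj_left.mpr
      intro i hi
      rw [List.mem_filter, List.mem_range] at hi
      rw [pairAt, valN, idxAt_range hi.1]
    rw [heq]

-- ---------- liveOf bridging ----------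
theorem liveOf_length (nums : List Int) (I : List Nat) :
    (liveOf nums I).length = I.length := by simp [liveOf]

theorem liveOf_getD {nums : List Int} {I : List Nat} {j : Nat} (hj : j < I.length) :
    (liveOf nums I).getD j (0, 0) = (((idxAt I j : Nat) : Int), valN nums I j) := by
  rw [liveOf, List.getD_eq_getElem _ _ (by simpa using hj), List.getElem_map]
  rw [valN, idxAt, List.getD_eq_getElem _ _ hj]

theorem eraseIdx_map {α β : Type} (f : α → β) (l : List α) :
    ∀ k, (l.map f).eraseIdx k = (l.eraseIdx k).map f := by
  induction l with
  | nil => intro k; simp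
  | cons x xs ih =>
    intro k
    cases k with
    | zero => simp [List.eraseIdx]
    | succ k => simp [List.eraseIdx, ih k]

theorem liveOf_erase (nums : List Int) (I : List Nat) (k : Nat) :
    (liveOf nums I).eraseIdx k = liveOf nums (I.eraseIdx k) := by
  rw [liveOf, liveOf, eraseIdx_map]

-- ---------- bestScan characterization ----------
theorem mem_pp {nums : List Int} {I : List Nat} {x : Int × Int} :
    x ∈ pp nums I ↔ ∃ k, k < I.length ∧ peakB nums I k = true ∧ pairAt nums I k = x := by
  constructor
  · intro h
    rcases List.mem_map.mp h with ⟨k, hk, rfl⟩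
    rcases List.mem_filter.mp hk with ⟨hkr, hpk⟩
    exact ⟨k, List.mem_range.mp hkr, hpk, rfl⟩
  · rintro ⟨k, hk, hpk, rfl⟩
    exact List.mem_map.mpr ⟨k, List.mem_filter.mpr ⟨List.mem_range.mpr hk, hpk⟩, rfl⟩

theorem mem_cands {nums : List Int} {I : List Nat} {y : (Int × Int) × Nat} :
    y ∈ cands nums I ↔
      ∃ k, k < I.length ∧ peakB nums I k = true ∧ (pairAt nums I k, k) = y := by
  constructor
  · intro h
    rcases List.mem_map.mp h with ⟨k, hk, rfl⟩
    rcases List.mem_filter.mp hk with ⟨hkr, hpk⟩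
    exact ⟨k, List.mem_range.mp hkr, hpk, rfl⟩
  · rintro ⟨k, hk, hpk, rfl⟩
    exact List.mem_map.mpr ⟨k, List.mem_filter.mpr ⟨List.mem_range.mpr hk, hpk⟩, rfl⟩

theorem bestScan_liveOf (nums : List Int) (I : List Nat) :
    bestScan (liveOf nums I) = (cands nums I).foldl bstep none := by
  rw [bestScan, foldl_guard (bpeek (liveOf nums I)) (bcand (liveOf nums I)) bstep]
  rw [cands, liveOf_length]
  have hfc : ∀ j ∈ List.range I.length, bpeek (liveOf nums I) j = peakB nums I j := by
    intro j hj
    have hjl := List.mem_range.mp hj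
    simp only [bpeek, peakB]
    rw [liveOf_length, liveOf_getD hjl, liveOf_getD (show j - 1 < I.length by omega)]
    by_cases hlast : j = I.length - 1
    · have hb : (j == I.length - 1) = true := by rw [beq_iff_eq]; exact hlast
      simp [hb]
    · rw [liveOf_getD (show j + 1 < I.length by omega)]
  rw [List.filter_congr hfc]
  have hmc : ∀ j ∈ (List.range I.length).filter (peakB nums I),
      bcand (liveOf nums I) j = (pairAt nums I j, j) := by
    intro j hj
    rw [List.mem_filter, List.mem_range] at hj
    rw [bcand, liveOf_getD hj.1, pairAt]
  rw [List.map_congr_left hmc]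

theorem bstep_some (b : Int × Int) (bk : Nat) (y : (Int × Int) × Nat) :
    bstep (some (b, bk)) y = if lexLt y.1 b = true then some y else some (b, bk) := rfl

theorem foldl_bstep_keep (c : List ((Int × Int) × Nat)) (xp : Int × Int) (xk : Nat)
    (h : ∀ y ∈ c, lexLt y.1 xp = false) : c.foldl bstep (some (xp, xk)) = some (xp, xk) := by
  induction c with
  | nil => rfl
  | cons y t ih =>
    rw [List.foldl_cons, bstep_some, if_neg (by simp [h y List.mem_cons_self])]
    exact ih (fun z hz => h z (List.mem_cons_of_mem y hz))

theorem foldl_bstep_reach (c : List ((Int × Int) × Nat)) :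
    ∀ (x : (Int × Int) × Nat), x ∈ c → (∀ y ∈ c, y ≠ x → lexLt x.1 y.1 = true) →
      ∀ (b : (Int × Int) × Nat), lexLt x.1 b.1 = true → c.foldl bstep (some b) = some x := by
  induction c with
  | nil => intro x hx; exact absurd hx (List.not_mem_nil)
  | cons h t ih =>
    intro x hx hmin b hb
    rcases b with ⟨bp, bk⟩
    rw [List.foldl_cons, bstep_some]
    by_cases hhx : h = x
    · subst hhx
      rw [if_pos hb]
      rcases h with ⟨hp, hk⟩
      apply foldl_bstep_keep
      intro y hy
      by_cases hyx : y = (hp, hk)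
      · subst hyx; exact lexLt_irrefl _
      · exact lexLt_asymm (hmin y (List.mem_cons_of_mem _ hy) hyx)
    · have hxt : x ∈ t := by
        rcases List.mem_cons.mp hx with he | ht
        · exact absurd he.symm hhx
        · exact ht
      have hxh : lexLt x.1 h.1 = true := hmin h List.mem_cons_self (fun he => hhx he)
      have hmin' : ∀ y ∈ t, y ≠ x → lexLt x.1 y.1 = true :=
        fun y hy => hmin y (List.mem_cons_of_mem _ hy)
      split
      · exact ih x hxt hmin' h hxh
      · exact ih x hxt hmin' (bp, bk) hb

theorem foldl_bstep_min (c : List ((Int × Int) × Nat)) (x : (Int × Int) × Nat)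
    (hx : x ∈ c) (hmin : ∀ y ∈ c, y ≠ x → lexLt x.1 y.1 = true) :
    c.foldl bstep none = some x := by
  cases c with
  | nil => exact absurd hx (List.not_mem_nil)
  | cons h t =>
    rw [List.foldl_cons]
    show t.foldl bstep (some h) = some x
    by_cases hhx : h = x
    · subst hhx
      rcases h with ⟨hp, hk⟩
      apply foldl_bstep_keep
      intro y hy
      by_cases hyx : y = (hp, hk)
      · subst hyx; exact lexLt_irrefl _
      · exact lexLt_asymm (hmin y (List.mem_cons_of_mem _ hy) hyx)
    · have hxt : x ∈ t := by
        rcases List.mem_cons.mp hx with he | ht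
        · exact absurd he.symm hhx
        · exact ht
      exact foldl_bstep_reach t x hxt
        (fun y hy => hmin y (List.mem_cons_of_mem _ hy)) h
        (hmin h List.mem_cons_self (fun he => hhx he))

-- ---------- loop unfolding equations ----------
theorem loopA_nil (nums : List Int) (fa : Nat) (prev next soln : List Int) :
    loopA nums fa prev next [] soln = soln := by cases fa <;> rfl

theorem loopA_cons (nums : List Int) (fa : Nat) (prev next : List Int) (v i : Int)
    (hs : List (Int × Int)) (soln : List Int) :
    loopA nums (fa + 1) prev next ((v, i) :: hs) soln =
      loopA nums fa (removeElement nums.length prev next i).1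
        (removeElement nums.length prev next i).2
        (if isPeakA nums (removeElement nums.length prev next i).1
              (removeElement nums.length prev next i).2 (getNextI nums.length next i) = true
         then hpush (nums.getD (getNextI nums.length next i).toNat 0,
                getNextI nums.length next i)
            (if isPeakA nums (removeElement nums.length prev next i).1
                  (removeElement nums.length prev next i).2
                  (getPrevI nums.length prev i) = true
             then hpush (nums.getD (getPrevI nums.length prev i).toNat 0,
                    getPrevI nums.length prev i) hs
             else hs)
         else (if isPeakA nums (removeElement nums.length prev next i).1
                  (removeElement nums.length prev next i).2
                  (getPrevI nums.length prev i) = true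
               then hpush (nums.getD (getPrevI nums.length prev i).toNat 0,
                      getPrevI nums.length prev i) hs
               else hs))
        (soln ++ [v]) := rfl

theorem loopB_none {f : Nat} {live : List (Int × Int)} {out : List Int}
    (h : bestScan live = none) : loopB (f + 1) live out = out := by
  simp [loopB, h]

theorem loopB_some {f : Nat} {live : List (Int × Int)} {out : List Int}
    {best : Int × Int} {j : Nat} (h : bestScan live = some (best, j)) :
    loopB (f + 1) live out = loopB f (live.eraseIdx j) (out ++ [best.1]) := by
  simp [loopB, h]

-- ---------- the main simulation ----------
theorem loop_eq (nums : List Int) :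
    ∀ (fa : Nat) (I : List Nat) (prev next : List Int) (heap : List (Int × Int))
      (fb : Nat) (soln : List Int),
      InvAB nums I prev next heap → I.length ≤ fa → I.length < fb →
      loopA nums fa prev next heap soln = loopB fb (liveOf nums I) soln := by
  intro fa
  induction fa with
  | zero =>
    intro I prev next heap fb soln hInv hfa hfb
    have hI : I = [] := List.length_eq_zero_iff.mp (by omega)
    subst hI
    have hheap : heap = [] := List.Perm.eq_nil (by simpa [pp] using hInv.2.2)
    subst hheap
    rw [loopA_nil]
    obtain ⟨fb', rfl⟩ : ∃ fb', fb = fb' + 1 := ⟨fb - 1, by omega⟩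
    have hbs : bestScan (liveOf nums []) = none := by
      rw [bestScan_liveOf]
      simp [cands]
    rw [loopB_none hbs]
  | succ fa ih =>
    intro I prev next heap fb soln hInv hfa hfb
    obtain ⟨hEn, hpw, hperm⟩ := hInv
    obtain ⟨fb', rfl⟩ : ∃ fb', fb = fb' + 1 := ⟨fb - 1, by omega⟩
    cases heap with
    | nil =>
      rw [loopA_nil]
      have hppnil : pp nums I = [] := List.Perm.eq_nil hperm.symm
      have hbs : bestScan (liveOf nums I) = none := by
        rw [bestScan_liveOf]
        have hf : (List.range I.length).filter (peakB nums I) = [] := by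
          rw [pp] at hppnil
          exact List.map_eq_nil_iff.mp hppnil
        rw [cands, hf]
        rfl
      rw [loopB_none hbs]
    | cons hd hs =>
      rcases hd with ⟨v, i⟩
      have hvi : (v, i) ∈ pp nums I := hperm.subset (List.mem_cons_self ..)
      rcases mem_pp.mp hvi with ⟨k, hk, hpk, hpair⟩
      have hv : valN nums I k = v := congrArg Prod.fst hpair
      have hi : ((idxAt I k : Nat) : Int) = i := congrArg Prod.snd hpair
      subst hv
      subst hi
      rw [loopA_cons, getPrevI_at hEn hk, getNextI_at hEn hk]
      have hEn' : En nums (I.eraseIdx k)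
          (removeElement nums.length prev next ((idxAt I k : Nat) : Int)).1
          (removeElement nums.length prev next ((idxAt I k : Nat) : Int)).2 :=
        En_remove hEn hk
      have hhead : ∀ y ∈ hs, lexLe (pairAt nums I k) y = true :=
        (List.pairwise_cons.mp hpw).1
      have hhs_pw : hs.Pairwise (fun a b => lexLe a b = true) :=
        (List.pairwise_cons.mp hpw).2
      -- hs is a permutation of the peaks of I other than position k
      have hhsHT : hs.Perm
          (((List.range (k - 1)).filter (peakB nums I)).map (pairAt nums I) ++
           (((List.range (I.length - k - 2)).map (fun t => k + 2 + t)).filter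
             (peakB nums I)).map (pairAt nums I)) := by
        have h1 : (pairAt nums I k :: hs).Perm
            (pairAt nums I k ::
              (((List.range (k - 1)).filter (peakB nums I)).map (pairAt nums I) ++
               (((List.range (I.length - k - 2)).map (fun t => k + 2 + t)).filter
                 (peakB nums I)).map (pairAt nums I))) := by
          have hperm2 : (pairAt nums I k :: hs).Perm (pp nums I) := hperm
          rw [pp_split hk hpk] at hperm2
          exact hperm2.trans List.perm_middle
        exact h1.cons_inv
      -- the conditional push on the previous neighbour
      have hstep1 : ∀ base : List (Int × Int),
          (if isPeakA nums
              (removeElement nums.length prev next ((idxAt I k : Nat) : Int)).1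
              (removeElement nums.length prev next ((idxAt I k : Nat) : Int)).2
              (pval I k) = true
           then hpush (nums.getD (pval I k).toNat 0, pval I k) base else base).Perm
          ((if k - 1 < k then
              (if peakB nums (I.eraseIdx k) (k - 1) = true
               then [pairAt nums (I.eraseIdx k) (k - 1)] else [])
            else []) ++ base) := by
        intro base
        by_cases h0 : k = 0
        · subst h0
          rw [pval, if_pos rfl, isPeakA_out (Or.inl (by norm_num)),
            if_neg (by simp), if_neg (by omega)]
          simp
        · have hk1 : k - 1 < (I.eraseIdx k).length := by rw [length_eraseIdx' hk]; omega
          have hpvk : pval I k = ((idxAt I (k - 1) : Nat) : Int) := by rw [pval, if_neg h0]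
          have hidx : idxAt (I.eraseIdx k) (k - 1) = idxAt I (k - 1) :=
            idxAt_erase_lt hk (by omega)
          have hpeak : isPeakA nums
              (removeElement nums.length prev next ((idxAt I k : Nat) : Int)).1
              (removeElement nums.length prev next ((idxAt I k : Nat) : Int)).2
              (pval I k) = peakB nums (I.eraseIdx k) (k - 1) := by
            rw [hpvk, ← hidx]
            exact isPeakA_eq hEn' hk1
          rw [hpeak, if_pos (by omega : k - 1 < k)]
          by_cases hp : peakB nums (I.eraseIdx k) (k - 1) = true
          · rw [if_pos hp, if_pos hp]
            have hpair2 : (nums.getD (pval I k).toNat 0, pval I k) =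
                pairAt nums (I.eraseIdx k) (k - 1) := by
              rw [hpvk, pairAt, valN, hidx, Int.toNat_natCast]
            rw [hpair2]
            exact hpush_perm _ base
          · rw [if_neg hp, if_neg hp]
            simp
      -- the conditional push on the next neighbour
      have hstep2 : ∀ base : List (Int × Int),
          (if isPeakA nums
              (removeElement nums.length prev next ((idxAt I k : Nat) : Int)).1
              (removeElement nums.length prev next ((idxAt I k : Nat) : Int)).2
              (nval nums I k) = true
           then hpush (nums.getD (nval nums I k).toNat 0, nval nums I k) base else base).Perm
          ((if k < (I.eraseIdx k).length then
              (if peakB nums (I.eraseIdx k) k = true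
               then [pairAt nums (I.eraseIdx k) k] else [])
            else []) ++ base) := by
        intro base
        by_cases hL : k + 1 = I.length
        · rw [nval, if_pos hL, isPeakA_out (Or.inr (by simp)),
            if_neg (by simp), if_neg (by rw [length_eraseIdx' hk]; omega)]
          simp
        · have hk1 : k < (I.eraseIdx k).length := by rw [length_eraseIdx' hk]; omega
          have hnvk : nval nums I k = ((idxAt I (k + 1) : Nat) : Int) := by
            rw [nval, if_neg hL]
          have hidx : idxAt (I.eraseIdx k) k = idxAt I (k + 1) :=
            idxAt_erase_ge hk (le_refl k)
          have hpeak : isPeakA nums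
              (removeElement nums.length prev next ((idxAt I k : Nat) : Int)).1
              (removeElement nums.length prev next ((idxAt I k : Nat) : Int)).2
              (nval nums I k) = peakB nums (I.eraseIdx k) k := by
            rw [hnvk, ← hidx]
            exact isPeakA_eq hEn' hk1
          rw [hpeak, if_pos hk1]
          by_cases hp : peakB nums (I.eraseIdx k) k = true
          · rw [if_pos hp, if_pos hp]
            have hpair2 : (nums.getD (nval nums I k).toNat 0, nval nums I k) =
                pairAt nums (I.eraseIdx k) k := by
              rw [hnvk, pairAt, valN, hidx, Int.toNat_natCast]
            rw [hpair2]
            exact hpush_perm _ base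
          · rw [if_neg hp, if_neg hp]
            simp
      -- the new heap is (a permutation of) the peaks of the shrunken list
      have hperm' :
          (if isPeakA nums
              (removeElement nums.length prev next ((idxAt I k : Nat) : Int)).1
              (removeElement nums.length prev next ((idxAt I k : Nat) : Int)).2
              (nval nums I k) = true
           then hpush (nums.getD (nval nums I k).toNat 0, nval nums I k)
             (if isPeakA nums
                 (removeElement nums.length prev next ((idxAt I k : Nat) : Int)).1
                 (removeElement nums.length prev next ((idxAt I k : Nat) : Int)).2
                 (pval I k) = true
              then hpush (nums.getD (pval I k).toNat 0, pval I k) hs else hs)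
           else (if isPeakA nums
                 (removeElement nums.length prev next ((idxAt I k : Nat) : Int)).1
                 (removeElement nums.length prev next ((idxAt I k : Nat) : Int)).2
                 (pval I k) = true
              then hpush (nums.getD (pval I k).toNat 0, pval I k) hs else hs)).Perm
          (pp nums (I.eraseIdx k)) := by
        refine (hstep2 _).trans ?_
        refine (List.Perm.append_left _ ((hstep1 hs).trans
          (List.Perm.append_left _ hhsHT))).trans ?_
        rw [pp_split_erase hk]
        have c1 : ((if k < (I.eraseIdx k).length then
              (if peakB nums (I.eraseIdx k) k = true
               then [pairAt nums (I.eraseIdx k) k] else [])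
            else []) ++
            (if k - 1 < k then
              (if peakB nums (I.eraseIdx k) (k - 1) = true
               then [pairAt nums (I.eraseIdx k) (k - 1)] else [])
            else []) ++
            ((List.range (k - 1)).filter (peakB nums I)).map (pairAt nums I)).Perm
            (((List.range (k - 1)).filter (peakB nums I)).map (pairAt nums I) ++
             ((if k - 1 < k then
                (if peakB nums (I.eraseIdx k) (k - 1) = true
                 then [pairAt nums (I.eraseIdx k) (k - 1)] else [])
              else []) ++
              (if k < (I.eraseIdx k).length then
                (if peakB nums (I.eraseIdx k) k = true
                 then [pairAt nums (I.eraseIdx k) k] else [])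
              else []))) :=
          List.perm_append_comm.trans (List.Perm.append_left _ List.perm_append_comm)
        have c2 := c1.append_right
          ((((List.range (I.length - k - 2)).map (fun t => k + 2 + t)).filter
            (peakB nums I)).map (pairAt nums I))
        simpa [List.append_assoc] using c2
      -- the new heap is still sorted
      have hpw2 :
          (if isPeakA nums
              (removeElement nums.length prev next ((idxAt I k : Nat) : Int)).1
              (removeElement nums.length prev next ((idxAt I k : Nat) : Int)).2
              (nval nums I k) = true
           then hpush (nums.getD (nval nums I k).toNat 0, nval nums I k)
             (if isPeakA nums
                 (removeElement nums.length prev next ((idxAt I k : Nat) : Int)).1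
                 (removeElement nums.length prev next ((idxAt I k : Nat) : Int)).2
                 (pval I k) = true
              then hpush (nums.getD (pval I k).toNat 0, pval I k) hs else hs)
           else (if isPeakA nums
                 (removeElement nums.length prev next ((idxAt I k : Nat) : Int)).1
                 (removeElement nums.length prev next ((idxAt I k : Nat) : Int)).2
                 (pval I k) = true
              then hpush (nums.getD (pval I k).toNat 0, pval I k) hs else hs)).Pairwise
            (fun a b => lexLe a b = true) := by
        have hp1 : (if isPeakA nums
              (removeElement nums.length prev next ((idxAt I k : Nat) : Int)).1
              (removeElement nums.length prev next ((idxAt I k : Nat) : Int)).2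
              (pval I k) = true
            then hpush (nums.getD (pval I k).toNat 0, pval I k) hs else hs).Pairwise
            (fun a b => lexLe a b = true) := by
          split
          · exact hpush_pairwise hhs_pw _
          · exact hhs_pw
        split
        · exact hpush_pairwise hp1 _
        · exact hp1
      -- B makes the same choice
      have hbs : bestScan (liveOf nums I) = some (pairAt nums I k, k) := by
        rw [bestScan_liveOf]
        apply foldl_bstep_min
        · exact mem_cands.mpr ⟨k, hk, hpk, rfl⟩
        · intro y hy hne
          rcases mem_cands.mp hy with ⟨m, hm, hpm, rfl⟩
          by_cases hpe : pairAt nums I m = pairAt nums I k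
          · exfalso
            have hmm : m = k := idxAt_inj hEn.1 hm hk (by
              have h2 := congrArg Prod.snd hpe
              simpa [pairAt] using h2)
            exact hne (by rw [hmm])
          · have hyh : pairAt nums I m ∈ pairAt nums I k :: hs :=
              hperm.symm.subset (mem_pp.mpr ⟨m, hm, hpm, rfl⟩)
            have hyhs : pairAt nums I m ∈ hs := by
              rcases List.mem_cons.mp hyh with he | h
              · exact absurd he hpe
              · exact h
            exact lexLt_of_lexLe_ne (hhead _ hyhs) (fun he => hpe he.symm)
      rw [loopB_some hbs, liveOf_erase]
      exact ih (I.eraseIdx k)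
        (removeElement nums.length prev next ((idxAt I k : Nat) : Int)).1
        (removeElement nums.length prev next ((idxAt I k : Nat) : Int)).2
        _ fb' (soln ++ [valN nums I k])
        ⟨hEn', hpw2, hperm'⟩
        (by rw [length_eraseIdx' hk]; omega)
        (by rw [length_eraseIdx' hk]; omega)

-- ---------- assembly ----------
theorem solve_eq_alt (nums : List Int) : solve nums = solve_alt nums := by
  have h := loop_eq nums nums.length (List.range nums.length)
    (initPrevNext nums.length).1 (initPrevNext nums.length).2
    (buildHeap nums (initPrevNext nums.length).1 (initPrevNext nums.length).2)
    (nums.length + 1) []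
    ⟨En_init nums, (heap_init nums).1, (heap_init nums).2⟩
    (by simp) (by simp)
  have hlive : liveOf nums (List.range nums.length) = enumPairs nums := rfl
  simp only [solve, solve_alt]
  rw [← hlive]
  exact h

-- ===== VERDICT (by name: the statement is the Claim_ definition above) =====
theorem solve_spec : Claim_equal_solve := by
  intro nums _
  show solve nums = solve_alt nums
  exact solve_eq_alt nums
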